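-- pv_equiv track=rewrite | github.com/szkjn/algorithmic-playground | Python/scripts/zero_run_replacer.py | replace_zeros
-- ===== SOURCE A (Python) =====
-- def replace_zeros(digits: str) -> str:
--     res = ""
--     count = 0
--
--     for i, digit in enumerate(digits):
--         if digit == "0":
--             count += 1
--             if i == len(digits) - 1:
--                 res += str(count)
--         else:
--             if count > 0:
--                 res += str(count)
--                 count = 0
--             res += digit
--
--     return res
-- ===== SOURCE B (Python) =====
-- def replace_zeros(digits: str) -> str:
--     parts = []
--     i, n = 0, len(digits)
--     while i < n:
--         j = i
--         while j < n and digits[j] == digits[i]: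
--             j += 1
--         if digits[i] == "0":
--             parts.append(str(j - i))
--         else:
--             parts.append(digits[i:j])
--         i = j
--     return "".join(parts)
-- ===== Notes on version B (the rewrite author's own statement) =====
-- stated objective: alternative
-- what changed: Replaces the per-character state machine (pending-zero counter with flush-on-last-index) by a run-based two-pointer scan that groups each maximal run of identical characters and emits either its length (for '0') or the run verbatim, joined at the end.
import Mathlib
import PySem

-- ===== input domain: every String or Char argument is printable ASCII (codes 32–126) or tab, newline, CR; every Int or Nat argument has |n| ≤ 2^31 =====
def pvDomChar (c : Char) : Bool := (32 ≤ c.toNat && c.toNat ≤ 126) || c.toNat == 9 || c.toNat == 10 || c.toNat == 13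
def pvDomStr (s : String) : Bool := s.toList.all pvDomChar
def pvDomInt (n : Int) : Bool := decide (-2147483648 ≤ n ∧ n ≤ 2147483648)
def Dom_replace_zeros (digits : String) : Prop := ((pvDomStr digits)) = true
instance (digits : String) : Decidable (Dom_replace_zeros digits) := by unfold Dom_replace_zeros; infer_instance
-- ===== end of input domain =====

-- B is an alternative, equally fast decomposition: a run-based scan instead of A's per-character counter state machine.

-- ===== PORT A =====
-- A: one pass over enumerate(digits) carrying (res, count); a zero run is flushed
-- either at the first non-zero character or, if the string ends in zeros, at the last index.
def pvStepA (n : Int) (st : List Char × Int) (p : Int × Char) : List Char × Int :=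
  if p.2 = '0' then
    let count := st.2 + 1
    if p.1 = n - 1 then (st.1 ++ PySem.Int.toChars count, count) else (st.1, count)
  else
    let st' := if st.2 > 0 then (st.1 ++ PySem.Int.toChars st.2, (0 : Int)) else st
    (st'.1 ++ [p.2], st'.2)

def replace_zeros (digits : String) : String :=
  let l := digits.toList
  let n : Int := l.length
  String.mk ((PySem.List.enumerate l).foldl (pvStepA n) ([], 0)).1

-- ===== PORT B =====
-- the inner 'while j < n and digits[j] == digits[i]' loop: split off the maximal
-- run of characters equal to c, returning (run, rest)
def pvTakeRun (c : Char) : List Char → List Char × List Char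
  | [] => ([], [])
  | x :: xs =>
    if x = c then
      let p := pvTakeRun c xs
      (x :: p.1, p.2)
    else ([], x :: xs)

theorem pvTakeRun_snd_length (c : Char) : ∀ l : List Char, (pvTakeRun c l).2.length ≤ l.length := by
  intro l
  induction l with
  | nil => simp [pvTakeRun]
  | cons x xs ih =>
    simp only [pvTakeRun]
    split_ifs <;> simp <;> omega

-- the outer while loop: one output piece per maximal run
def pvAltGo : List Char → List (List Char)
  | [] => []
  | x :: xs =>
    let p := pvTakeRun x xs
    (if x = '0' then PySem.Int.toChars ((p.1.length + 1 : Nat) : Int) else x :: p.1) :: pvAltGo p.2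
termination_by l => l.length
decreasing_by
  have := pvTakeRun_snd_length x xs
  simp only [List.length_cons]
  omega

def replace_zeros_alt (digits : String) : String :=
  String.mk (PySem.Chars.join [] (pvAltGo digits.toList))

-- ===== PRECONDITION & SPEC =====
def Spec_replace_zeros (digits : String) (out : String) : Prop := out = replace_zeros_alt digits
instance (digits : String) (out : String) : Decidable (Spec_replace_zeros digits out) := by unfold Spec_replace_zeros; infer_instance

-- ===== CLAIM (what is proved, stated in full; the proofs are below) =====
def Claim_equal_replace_zeros : Prop := ∀ (digits : String), Dom_replace_zeros digits → Spec_replace_zeros digits (replace_zeros digits)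

-- ===== LEMMAS AND PROOFS =====

-- common recursive reference: pvGo l count = the characters A still appends, given
-- 'count' pending zeros and remaining input l
def pvGo : List Char → Int → List Char
  | [], _ => []
  | c :: rest, count =>
    if c = '0' then
      if rest = [] then PySem.Int.toChars (count + 1) else pvGo rest (count + 1)
    else (if count > 0 then PySem.Int.toChars count else []) ++ c :: pvGo rest 0

theorem pvA_loop (n : Int) : ∀ (l : List Char) (s : Int) (res : List Char) (count : Int),
    s + l.length = n → 0 ≤ count →
    ((PySem.List.enumerate l s).foldl (pvStepA n) (res, count)).1 = res ++ pvGo l count := by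
  intro l
  induction l with
  | nil => intro s res count _ _; simp [PySem.List.enumerate_nil, pvGo]
  | cons c rest ih =>
    intro s res count hs hcnt
    rw [PySem.List.enumerate_cons, List.foldl_cons]
    by_cases hc : c = '0'
    · subst hc
      by_cases hrest : rest = []
      · subst hrest
        have hlast : s = n - 1 := by simp at hs; omega
        have h1 : pvStepA n (res, count) (s, '0') = (res ++ PySem.Int.toChars (count + 1), count + 1) := by
          simp [pvStepA, hlast]
        rw [h1]
        simp [PySem.List.enumerate_nil, pvGo]
      · have hnot : ¬ (s = n - 1) := by
          have hpos : (0:Int) < rest.length := by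
            cases rest with
            | nil => exact absurd rfl hrest
            | cons a b => simp
          simp at hs; omega
        have h1 : pvStepA n (res, count) (s, '0') = (res, count + 1) := by
          simp [pvStepA, hnot]
        rw [h1, ih (s + 1) res (count + 1) (by simp at hs ⊢; omega) (by omega)]
        simp [pvGo, hrest]
    · by_cases hcount : count > 0
      · have h1 : pvStepA n (res, count) (s, c) = (res ++ PySem.Int.toChars count ++ [c], 0) := by
          simp [pvStepA, hc, hcount]
        rw [h1, ih (s + 1) _ 0 (by simp at hs ⊢; omega) le_rfl]
        simp [pvGo, hc, hcount]
      · have hzero : count = 0 := by omega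
        subst hzero
        have h1 : pvStepA n (res, 0) (s, c) = (res ++ [c], 0) := by
          simp [pvStepA, hc]
        rw [h1, ih (s + 1) _ 0 (by simp at hs ⊢; omega) le_rfl]
        simp [pvGo, hc]

theorem pvTakeRun_split (c : Char) : ∀ l : List Char, l = (pvTakeRun c l).1 ++ (pvTakeRun c l).2 := by
  intro l
  induction l with
  | nil => simp [pvTakeRun]
  | cons x xs ih =>
    simp only [pvTakeRun]
    split_ifs with h
    · simpa using ih
    · simp

theorem pvTakeRun_fst (c : Char) : ∀ l : List Char,
    (pvTakeRun c l).1 = List.replicate (pvTakeRun c l).1.length c := by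
  intro l
  induction l with
  | nil => simp [pvTakeRun]
  | cons x xs ih =>
    simp only [pvTakeRun]
    split_ifs with h
    · subst h; simpa [List.replicate_succ] using ih
    · simp

theorem pvTakeRun_snd_ne (c : Char) : ∀ (l : List Char) (y : Char) (t : List Char),
    (pvTakeRun c l).2 = y :: t → y ≠ c := by
  intro l
  induction l with
  | nil => intro y t h; simp [pvTakeRun] at h
  | cons x xs ih =>
    intro y t h
    simp only [pvTakeRun] at h
    split_ifs at h with hx
    · exact ih y t h
    · simp at h
      rcases h with ⟨h1, _⟩
      subst h1; exact hx

-- a zero run of length k+1 accumulates into the counter (flushed at the end of input)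
theorem pvGo_zeros : ∀ (k : Nat) (rest : List Char) (count : Int),
    pvGo (List.replicate (k + 1) '0' ++ rest) count =
      if rest = [] then PySem.Int.toChars (count + (k + 1 : Nat)) else pvGo rest (count + (k + 1 : Nat)) := by
  intro k
  induction k with
  | zero => intro rest count; cases rest <;> simp [pvGo, List.replicate_succ]
  | succ k ih =>
    intro rest count
    rw [List.replicate_succ, List.cons_append]
    have hne : List.replicate (k + 1) '0' ++ rest ≠ [] := by simp [List.replicate_succ]
    have hstep : pvGo ('0' :: (List.replicate (k + 1) '0' ++ rest)) count
        = pvGo (List.replicate (k + 1) '0' ++ rest) (count + 1) := by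
      simp [pvGo, hne]
    rw [hstep, ih rest (count + 1)]
    have harg : count + 1 + ((k + 1 : Nat) : Int) = count + ((k + 1 + 1 : Nat) : Int) := by
      push_cast; ring
    rw [harg]

-- a run of k identical non-zero characters is copied verbatim with counter 0
theorem pvGo_nonzeros (c : Char) (hc : c ≠ '0') : ∀ (k : Nat) (rest : List Char),
    pvGo (List.replicate k c ++ rest) 0 = List.replicate k c ++ pvGo rest 0 := by
  intro k
  induction k with
  | zero => intro rest; simp
  | succ k ih =>
    intro rest
    rw [List.replicate_succ, List.cons_append]
    simp only [pvGo, if_neg hc]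
    rw [ih rest]
    simp [List.replicate_succ]

theorem pvAltGo_nil : pvAltGo [] = [] := by rw [pvAltGo]

theorem pvAltGo_cons (c : Char) (xs : List Char) :
    pvAltGo (c :: xs) =
      (if c = '0' then PySem.Int.toChars (((pvTakeRun c xs).1.length + 1 : Nat) : Int)
       else c :: (pvTakeRun c xs).1) :: pvAltGo (pvTakeRun c xs).2 := by
  rw [pvAltGo]

theorem pvGo_eq_altGo : ∀ (m : Nat) (l : List Char), l.length ≤ m → pvGo l 0 = (pvAltGo l).flatten := by
  intro m
  induction m with
  | zero =>
    intro l h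
    have : l = [] := by cases l <;> simp_all
    subst this
    simp [pvGo, pvAltGo_nil]
  | succ m ih =>
    intro l h
    cases l with
    | nil => simp [pvGo, pvAltGo_nil]
    | cons c xs =>
      have hsplit := pvTakeRun_split c xs
      have hfst := pvTakeRun_fst c xs
      have hl : c :: xs = List.replicate ((pvTakeRun c xs).1.length + 1) c ++ (pvTakeRun c xs).2 := by
        rw [List.replicate_succ, List.cons_append, ← hfst]
        exact congrArg (c :: ·) hsplit
      have hlen : (pvTakeRun c xs).2.length ≤ m := by
        have h2 := pvTakeRun_snd_length c xs
        simp at h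
        omega
      have hIH : pvGo (pvTakeRun c xs).2 0 = (pvAltGo (pvTakeRun c xs).2).flatten := ih _ hlen
      rw [pvAltGo_cons, List.flatten_cons]
      by_cases hc : c = '0'
      · subst hc
        rw [hl, pvGo_zeros (pvTakeRun '0' xs).1.length (pvTakeRun '0' xs).2 0]
        cases hr : (pvTakeRun '0' xs).2 with
        | nil => simp [pvAltGo_nil]
        | cons y t =>
          have hy : y ≠ '0' := pvTakeRun_snd_ne '0' xs y t hr
          have hpos : ((((pvTakeRun '0' xs).1.length + 1 : Nat)) : Int) > 0 := by positivity
          rw [hr] at hIH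
          rw [if_neg (List.cons_ne_nil y t), if_pos rfl, zero_add, ← hIH]
          simp [pvGo, hy, hpos]
      · rw [hl, pvGo_nonzeros c hc ((pvTakeRun c xs).1.length + 1) (pvTakeRun c xs).2, hIH]
        rw [if_neg hc]
        congr 1
        rw [List.replicate_succ, ← hfst]

theorem pvChars_join_nil (ps : List (List Char)) : PySem.Chars.join [] ps = ps.flatten := by
  induction ps with
  | nil => simp [PySem.Chars.join_nil]
  | cons p ps ih =>
    cases ps with
    | nil => simp [PySem.Chars.join_singleton]
    | cons q qs =>
      rw [PySem.Chars.join_cons_cons] at *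
      simp [List.flatten_cons, ih]

-- ===== VERDICT (by name: the statement is the Claim_ definition above) =====
theorem replace_zeros_spec : Claim_equal_replace_zeros := by
  intro digits _
  show String.mk ((PySem.List.enumerate digits.toList).foldl
      (pvStepA (digits.toList.length : Int)) ([], 0)).1
    = String.mk (PySem.Chars.join [] (pvAltGo digits.toList))
  rw [pvA_loop (digits.toList.length : Int) digits.toList 0 [] 0 (by simp) le_rfl]
  rw [pvGo_eq_altGo digits.toList.length digits.toList le_rfl, pvChars_join_nil]
  simp
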